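-- pv_equiv track=rewrite | github.com/3sigmalab/SINDyG | SindyGraph_functions.py | get_sink_indices
-- ===== SOURCE A (Python) =====
-- def get_sink_indices(source_indices, d, num_sv): # num_sv: number of state variables
--     """Extracts sink indices (groups) from a list of source indices.
--
--     Args:
--         source_indices: A list of integers within the range of available numbers.
--         d: The dimension of each node (e.g., 2 for pairs, 3 for triplets).
--         num_sv: The total number of available state variables (e.g., 6 in simple example).
--
--     Returns:
--         A sorted list of sink indices, including groups for each source index.
--     """
--
--     sink_indices = set()
--     groups = [list(range(i, min(i + d, num_sv))) for i in range(0, num_sv, d)]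
--
--     for num in source_indices:
--         if num < 0 or num >= num_sv:
--             raise ValueError("Source index out of range num = ", num, " num_sv =", num_sv)
--
--         group_index = num // d
--         sink_indices.update(groups[group_index])
--
--     return sorted(sink_indices)
-- ===== SOURCE B (Python) =====
-- def get_sink_indices(source_indices, d, num_sv):
--     """Collect the group indices hit by the sources, then emit each group's
--     member range in increasing group order (already globally sorted)."""
--     group_set = set()
--     for num in source_indices:
--         if num < 0 or num >= num_sv:
--             raise ValueError("Source index out of range num = ", num, " num_sv =", num_sv)
--         group_set.add(num // d)
--     out = []
--     for g in sorted(group_set):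
--         start = g * d
--         out.extend(range(start, min(start + d, num_sv)))
--     return out
-- ===== Notes on version B (the rewrite author's own statement) =====
-- stated objective: alternative
-- what changed: Instead of precomputing every group's member list, collecting a set of sink elements and sorting it, B collects only the set of group indices hit and concatenates each group's range in increasing group order, so no table of groups is built and no final element sort is needed.
import Mathlib
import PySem

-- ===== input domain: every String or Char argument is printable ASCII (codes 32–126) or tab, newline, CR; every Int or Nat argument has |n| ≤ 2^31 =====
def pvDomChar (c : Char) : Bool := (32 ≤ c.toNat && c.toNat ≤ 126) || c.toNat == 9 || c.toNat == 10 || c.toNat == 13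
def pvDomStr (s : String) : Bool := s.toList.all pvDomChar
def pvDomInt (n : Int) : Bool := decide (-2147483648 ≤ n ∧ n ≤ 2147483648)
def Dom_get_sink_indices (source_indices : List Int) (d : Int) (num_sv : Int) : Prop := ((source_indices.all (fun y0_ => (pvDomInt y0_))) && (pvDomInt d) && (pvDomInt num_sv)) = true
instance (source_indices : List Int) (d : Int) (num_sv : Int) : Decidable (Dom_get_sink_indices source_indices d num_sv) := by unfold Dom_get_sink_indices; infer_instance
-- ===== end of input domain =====

-- B avoids A's precomputed group table and final element sort: it collects the set of
-- group indices hit and concatenates each group's range in increasing group order.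

-- ===== PORT A =====
def get_sink_indices (source_indices : List Int) (d : Int) (num_sv : Int) : List Int :=
  let groups : List (List Int) :=
    (PySem.List.pyRange 0 num_sv d).map (fun i => PySem.List.pyRange i (min (i + d) num_sv) 1)
  let sink_indices : PySem.Set Int :=
    source_indices.foldl (fun s num =>
      if num < 0 || num ≥ num_sv then s  -- Python raises ValueError here; excluded by Pre_
      else PySem.Set.update s ((PySem.List.pyGet? groups (PySem.Int.floordiv num d)).getD []))
      -- pyGet? none = IndexError; excluded by Pre_
      PySem.Set.empty
  PySem.List.sorted sink_indices (fun x => x)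

-- ===== PORT B =====
def get_sink_indices_alt (source_indices : List Int) (d : Int) (num_sv : Int) : List Int :=
  let group_set : PySem.Set Int :=
    source_indices.foldl (fun s num =>
      if num < 0 || num ≥ num_sv then s  -- Python raises ValueError here; excluded by Pre_
      else PySem.Set.add s (PySem.Int.floordiv num d))
      PySem.Set.empty
  (PySem.List.sorted group_set (fun x => x)).foldl
    (fun out g => out ++ PySem.List.pyRange (g * d) (min (g * d + d) num_sv) 1) []

-- ===== PRECONDITION & SPEC =====
-- Exactly the inputs on which A returns: d ≠ 0 (range step), every source index in
-- [0, num_sv) (else ValueError), and d > 0 unless there are no sources (a negative d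
-- with a nonempty source list makes groups[...] raise IndexError).
def Pre_get_sink_indices (source_indices : List Int) (d : Int) (num_sv : Int) : Prop :=
  d ≠ 0 ∧ (0 < d ∨ source_indices = []) ∧ ∀ num ∈ source_indices, 0 ≤ num ∧ num < num_sv
instance (source_indices : List Int) (d : Int) (num_sv : Int) : Decidable (Pre_get_sink_indices source_indices d num_sv) := by unfold Pre_get_sink_indices; infer_instance

def pvWitness_get_sink_indices : List Int × Int × Int := ([0, 3], 2, 6)

def Spec_get_sink_indices (source_indices : List Int) (d : Int) (num_sv : Int) (out : List Int) : Prop := out = get_sink_indices_alt source_indices d num_sv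
instance (source_indices : List Int) (d : Int) (num_sv : Int) (out : List Int) : Decidable (Spec_get_sink_indices source_indices d num_sv out) := by unfold Spec_get_sink_indices; infer_instance

-- ===== CLAIM (what is proved, stated in full; the proofs are below) =====
def Claim_equal_get_sink_indices : Prop := ∀ (source_indices : List Int) (d : Int) (num_sv : Int), Dom_get_sink_indices source_indices d num_sv → Pre_get_sink_indices source_indices d num_sv → Spec_get_sink_indices source_indices d num_sv (get_sink_indices source_indices d num_sv)

-- ===== LEMMAS AND PROOFS =====

-- membership and nodup of A's accumulation loop
theorem mem_foldl_update {β : Type} (l : List β) (g : β → List Int) (s : PySem.Set Int) (y : Int) :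
    y ∈ l.foldl (fun s x => PySem.Set.update s (g x)) s ↔ y ∈ s ∨ ∃ x ∈ l, y ∈ g x := by
  induction l generalizing s with
  | nil => simp
  | cons a t ih => simp [List.foldl_cons, ih, PySem.Set.mem_update]; tauto

theorem nodup_foldl_update {β : Type} (l : List β) (g : β → List Int) (s : PySem.Set Int)
    (hs : s.Nodup) : (l.foldl (fun s x => PySem.Set.update s (g x)) s).Nodup := by
  induction l generalizing s with
  | nil => exact hs
  | cons a t ih => exact ih _ (PySem.Set.nodup_update _ _ hs)

-- groups[num // d] is exactly the range of num's group
theorem groups_get (d num_sv num : Int) (hd : 0 < d) (h0 : 0 ≤ num) (h1 : num < num_sv) :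
    PySem.List.pyGet?
      ((PySem.List.pyRange 0 num_sv d).map
        (fun i => PySem.List.pyRange i (min (i + d) num_sv) 1))
      (PySem.Int.floordiv num d)
      = some (PySem.List.pyRange (PySem.Int.floordiv num d * d)
          (min (PySem.Int.floordiv num d * d + d) num_sv) 1) := by
  rw [PySem.Int.floordiv_eq_ediv_of_pos hd]
  have hq0 : 0 ≤ num / d := Int.ediv_nonneg h0 hd.le
  have hle : num / d ≤ (num_sv - 1) / d := Int.ediv_le_ediv hd (by omega)
  have hstep : (num_sv + d - 1) / d = (num_sv - 1) / d + 1 := by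
    rw [show num_sv + d - 1 = num_sv - 1 + 1 * d by ring,
        Int.add_mul_ediv_right _ _ (ne_of_gt hd)]
  rw [PySem.List.pyRange_of_pos 0 num_sv hd, if_pos (by omega : (0:Int) < num_sv),
      show num_sv - 0 + d - 1 = num_sv + d - 1 by ring]
  rw [PySem.List.pyGet?_of_nonneg _ hq0, List.map_map, List.getElem?_map,
      List.getElem?_range (by omega : (num / d).toNat < ((num_sv + d - 1) / d).toNat)]
  have hval : (0:Int) + d * ((num / d).toNat : Int) = num / d * d := by
    rw [Int.toNat_of_nonneg hq0]; ring
  simp only [Option.map_some, Function.comp_apply, hval]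

-- elements of a lower group precede elements of a higher group
theorem cross_lt (d num_sv g1 g2 x y : Int) (hd : 0 < d) (hg : g1 < g2)
    (hx : x ∈ PySem.List.pyRange (g1 * d) (min (g1 * d + d) num_sv) 1)
    (hy : y ∈ PySem.List.pyRange (g2 * d) (min (g2 * d + d) num_sv) 1) : x < y := by
  rw [PySem.List.mem_pyRange_one] at hx hy
  have hmul : (g1 + 1) * d ≤ g2 * d := mul_le_mul_of_nonneg_right (by omega) hd.le
  have : x < g1 * d + d := lt_of_lt_of_le hx.2 (min_le_left _ _)
  nlinarith [hy.1]

-- the main equality for d > 0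
theorem main_pos (source_indices : List Int) (d num_sv : Int) (hd : 0 < d)
    (hin : ∀ num ∈ source_indices, 0 ≤ num ∧ num < num_sv) :
    get_sink_indices source_indices d num_sv = get_sink_indices_alt source_indices d num_sv := by
  simp only [get_sink_indices, get_sink_indices_alt]
  have hA := PySem.List.foldl_congr_mem source_indices
    (fun s num =>
      if num < 0 || num ≥ num_sv then s
      else PySem.Set.update s ((PySem.List.pyGet?
        ((PySem.List.pyRange 0 num_sv d).map
          (fun i => PySem.List.pyRange i (min (i + d) num_sv) 1))
        (PySem.Int.floordiv num d)).getD []))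
    (fun s num => PySem.Set.update s
      (PySem.List.pyRange (PySem.Int.floordiv num d * d)
        (min (PySem.Int.floordiv num d * d + d) num_sv) 1))
    PySem.Set.empty (by
      intro acc num hnum
      obtain ⟨h0, h1⟩ := hin num hnum
      have hfalse : (decide (num < 0) || decide (num ≥ num_sv)) = false := by
        simp only [Bool.or_eq_false_iff, decide_eq_false_iff_not, not_lt, ge_iff_le, not_le]
        omega
      simp only [hfalse, Bool.false_eq_true, if_false, groups_get d num_sv num hd h0 h1,
        Option.getD_some])
  have hB := PySem.List.foldl_congr_mem source_indices
    (fun s num =>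
      if num < 0 || num ≥ num_sv then s
      else PySem.Set.add s (PySem.Int.floordiv num d))
    (fun s num => PySem.Set.add s (PySem.Int.floordiv num d))
    PySem.Set.empty (by
      intro acc num hnum
      obtain ⟨h0, h1⟩ := hin num hnum
      have hfalse : (decide (num < 0) || decide (num ≥ num_sv)) = false := by
        simp only [Bool.or_eq_false_iff, decide_eq_false_iff_not, not_lt, ge_iff_le, not_le]
        omega
      simp only [hfalse, Bool.false_eq_true, if_false])
  rw [hA, hB, ← PySem.Set.update_map_eq_foldl_add, PySem.Set.update_empty,
      PySem.List.foldl_append_eq_flatMap, List.nil_append]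
  set R : Int → List Int :=
    fun g => PySem.List.pyRange (g * d) (min (g * d + d) num_sv) 1 with hR
  set G := PySem.Set.ofList (source_indices.map (fun num => PySem.Int.floordiv num d)) with hGdef
  have hsortG : (PySem.List.sorted G (fun x => x)).Pairwise (· < ·) :=
    PySem.List.sorted_ofList_pairwise_lt _
  have hBpair : ((PySem.List.sorted G (fun x => x)).flatMap R).Pairwise (· < ·) := by
    rw [List.pairwise_flatMap]
    refine ⟨fun g _ => PySem.List.pairwise_lt_pyRange_one _ _, ?_⟩
    exact hsortG.imp_of_mem
      (fun {a b} _ _ hab x hx y hy => cross_lt d num_sv a b x y hd hab hx hy)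
  apply PySem.List.sorted_eq_of_perm_of_pairwise_lt _ _ _ ?_ hBpair
  refine (List.perm_ext_iff_of_nodup (hBpair.imp ne_of_lt)
      (nodup_foldl_update _ _ PySem.Set.empty List.nodup_nil)).mpr ?_
  intro x
  rw [List.mem_flatMap,
      mem_foldl_update source_indices
        (fun num => PySem.List.pyRange (PySem.Int.floordiv num d * d)
          (min (PySem.Int.floordiv num d * d + d) num_sv) 1) PySem.Set.empty x]
  rw [show (x ∈ (PySem.Set.empty : PySem.Set Int)) = False from by simp [PySem.Set.empty], false_or]
  constructor
  · rintro ⟨g, hg, hx⟩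
    rw [PySem.List.mem_sorted, hGdef, PySem.Set.mem_ofList, List.mem_map] at hg
    obtain ⟨num, hnum, rfl⟩ := hg
    exact ⟨num, hnum, hx⟩
  · rintro ⟨num, hnum, hx⟩
    refine ⟨PySem.Int.floordiv num d, ?_, hx⟩
    rw [PySem.List.mem_sorted, hGdef, PySem.Set.mem_ofList, List.mem_map]
    exact ⟨num, hnum, rfl⟩

-- ===== VERDICT (by name: the statement is the Claim_ definition above) =====
theorem get_sink_indices_spec : Claim_equal_get_sink_indices := by
  intro source_indices d num_sv _ hpre
  obtain ⟨hd0, hcase, hin⟩ := hpre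
  unfold Spec_get_sink_indices
  rcases hcase with hd | hnil
  · exact main_pos source_indices d num_sv hd hin
  · subst hnil; rfl
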